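-- pv_equiv track=rewrite | github.com/danimano/TRP | GUI/color_generation.py | color_generation
-- ===== SOURCE A (Python) =====
-- def color_generation(index):
--     red = 0
--     green = 0
--     blue = 0
--     for i in range(0, index + 1):
--         if i % 3 == 0:
--             red += 50
--
--         elif i % 3 == 1:
--             green += 50
--
--         else:
--             blue += 50
--
--         if i > 0 and red == blue and blue == green:
--             if i % 3 == 0:
--                 blue -= 75
--
--             elif i % 3 == 1:
--                 red += 65
--
--             else:
--                 green -= 55
--
--     return [red % 255, green % 255, blue % 255]
-- ===== SOURCE B (Python) =====
-- def color_generation(index):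
--     if index < 0:
--         return [0, 0, 0]
--     red = 50 * (index // 3 + 1)
--     green = 50 * ((index + 2) // 3) - (55 if index >= 2 else 0)
--     blue = 50 * ((index + 1) // 3)
--     return [red % 255, green % 255, blue % 255]
-- ===== Notes on version B (the rewrite author's own statement) =====
-- stated objective: faster
-- what changed: Replaces A's per-index accumulation loop with a closed form: the increment times the count of each residue class in the range, minus the one-time green adjustment (which fires only on the first full cycle and never again), then the final mod.
import Mathlib
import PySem

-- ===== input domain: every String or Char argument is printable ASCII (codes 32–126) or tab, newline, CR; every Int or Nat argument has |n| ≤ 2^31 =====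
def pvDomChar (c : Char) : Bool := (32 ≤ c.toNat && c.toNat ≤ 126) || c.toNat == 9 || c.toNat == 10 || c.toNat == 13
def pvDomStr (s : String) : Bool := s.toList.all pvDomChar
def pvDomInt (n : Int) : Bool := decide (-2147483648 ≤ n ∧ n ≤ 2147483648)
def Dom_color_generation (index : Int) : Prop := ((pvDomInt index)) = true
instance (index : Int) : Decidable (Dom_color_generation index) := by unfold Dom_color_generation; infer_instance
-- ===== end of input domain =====

-- B replaces A's O(n) accumulation loop with an O(1) closed form (residue-class counts times the increment, the one-time green adjustment, then the final mod).

-- ===== PORT A =====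
-- one iteration of A's for-loop body, state = (red, green, blue)
def cgStep (st : Int × Int × Int) (i : Int) : Int × Int × Int :=
  let r := st.1; let g := st.2.1; let b := st.2.2
  let r := if PySem.Int.mod i 3 = 0 then r + 50 else r
  let g := if PySem.Int.mod i 3 = 0 then g else if PySem.Int.mod i 3 = 1 then g + 50 else g
  let b := if PySem.Int.mod i 3 = 0 then b else if PySem.Int.mod i 3 = 1 then b else b + 50
  if i > 0 ∧ r = b ∧ b = g then
    if PySem.Int.mod i 3 = 0 then (r, g, b - 75)
    else if PySem.Int.mod i 3 = 1 then (r + 65, g, b)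
    else (r, g - 55, b)
  else (r, g, b)

def color_generation (index : Int) : List Int :=
  let st := (PySem.List.pyRange 0 (index + 1) 1).foldl cgStep (0, 0, 0)
  [PySem.Int.mod st.1 255, PySem.Int.mod st.2.1 255, PySem.Int.mod st.2.2 255]

-- ===== PORT B =====
def color_generation_alt (index : Int) : List Int :=
  if index < 0 then [0, 0, 0]
  else
    let red := 50 * (PySem.Int.floordiv index 3 + 1)
    let green := 50 * PySem.Int.floordiv (index + 2) 3 - (if index ≥ 2 then 55 else 0)
    let blue := 50 * PySem.Int.floordiv (index + 1) 3
    [PySem.Int.mod red 255, PySem.Int.mod green 255, PySem.Int.mod blue 255]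

-- ===== PRECONDITION & SPEC =====
def Spec_color_generation (index : Int) (out : List Int) : Prop := out = color_generation_alt index
instance (index : Int) (out : List Int) : Decidable (Spec_color_generation index out) := by unfold Spec_color_generation; infer_instance

-- ===== CLAIM (what is proved, stated in full; the proofs are below) =====
def Claim_equal_color_generation : Prop := ∀ (index : Int), Dom_color_generation index → Spec_color_generation index (color_generation index)

-- ===== LEMMAS AND PROOFS =====

-- closed-form invariant of A's loop after processing 0..n
lemma cg_loop_inv (n : Nat) :
    (PySem.List.pyRange 0 ((n : Int) + 1) 1).foldl cgStep (0, 0, 0) =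
      (50 * ((n : Int) / 3 + 1),
       50 * (((n : Int) + 2) / 3) - (if 2 ≤ (n : Int) then 55 else 0),
       50 * (((n : Int) + 1) / 3)) := by
  induction n with
  | zero => decide
  | succ n ih =>
    have h : PySem.List.pyRange 0 ((n : Int) + 1 + 1) 1
        = PySem.List.pyRange 0 ((n : Int) + 1) 1 ++ [(n : Int) + 1] :=
      PySem.List.pyRange_one_succ_right (by omega)
    push_cast
    rw [h, List.foldl_append]
    simp only [List.foldl]
    rw [ih]
    simp only [cgStep, PySem.Int.mod_eq_emod_of_pos (by norm_num : (0:Int) < 3)]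
    split_ifs <;> simp_all [Prod.ext_iff] <;> omega

-- ===== VERDICT (by name: the statement is the Claim_ definition above) =====
theorem color_generation_spec : Claim_equal_color_generation := by
  unfold Claim_equal_color_generation Spec_color_generation
  intro index _
  by_cases hneg : index < 0
  · simp only [color_generation, color_generation_alt, if_pos hneg,
      PySem.List.pyRange_one_eq_nil (by omega : index + 1 ≤ 0), List.foldl_nil]
    decide
  · rw [Int.not_lt] at hneg
    obtain ⟨n, rfl⟩ := Int.eq_ofNat_of_zero_le hneg
    simp only [color_generation, color_generation_alt, cg_loop_inv n,
      if_neg (by omega : ¬ ((n : Int) < 0)),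
      PySem.Int.floordiv_eq_ediv_of_pos (by norm_num : (0:Int) < 3)]
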